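-- pv_equiv track=rewrite | github.com/boubacar-sow/ACSR | src/acsr/utils/text_processing.py | syllabify_liaphon
-- ===== SOURCE A (Python) =====
-- def syllabify_liaphon(ipa_text):
--     """
--     Convert IPA text to syllables.
--
--     Args:
--         ipa_text (str): IPA text with space-separated phonemes.
--
--     Returns:
--         list: List of syllables.
--     """
--     consonants = {"b", "d", "f", "g", "h", "j", "k", "l", "m", "n", "n~", "p", "r", "s", "s^", "t", "v", "w", "z", "z^", "ng", "gn"}
--     vowels = {"a", "a~", "e", "e^", "e~", "i", "o", "o^", "o~", "u", "y", "x", "x^", "x~"}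
--     phonemes = ipa_text.split()
--     syllables = []
--     i = 0
--
--     while i < len(phonemes):
--         phone = phonemes[i]
--         if phone in vowels:
--             syllables.append(phone)
--             i += 1
--         elif phone in consonants:
--             # Check if there is a next phone
--             if i + 1 < len(phonemes):
--                 next_phone = phonemes[i + 1]
--                 if next_phone in vowels:
--                     syllable = phone + next_phone
--                     syllables.append(syllable)
--                     i += 2
--                 else:
--                     if next_phone == "q":
--                         syllables.append(phone)
--                         i += 2
--                     else:
--                         syllables.append(phone)
--                         i += 1
--             else:
--                 syllables.append(phone)
--                 i += 1
--         else:
--             i += 1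
--     return syllables
-- ===== SOURCE B (Python) =====
-- def syllabify_liaphon(ipa_text):
--     """Single forward pass with a pending-consonant accumulator instead of index lookahead."""
--     consonants = {"b", "d", "f", "g", "h", "j", "k", "l", "m", "n", "n~", "p", "r", "s", "s^", "t", "v", "w", "z", "z^", "ng", "gn"}
--     vowels = {"a", "a~", "e", "e^", "e~", "i", "o", "o^", "o~", "u", "y", "x", "x^", "x~"}
--     syllables = []
--     pending = None
--     for tok in ipa_text.split():
--         if tok in vowels:
--             syllables.append(tok if pending is None else pending + tok)
--             pending = None
--         elif tok in consonants:
--             if pending is not None: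
--                 syllables.append(pending)
--             pending = tok
--         else:
--             if pending is not None:
--                 syllables.append(pending)
--             pending = None
--     if pending is not None:
--         syllables.append(pending)
--     return syllables
-- ===== Notes on version B (the rewrite author's own statement) =====
-- stated objective: simpler
-- what changed: Replaced the index-based while loop with i+=2 lookahead (peeking at phonemes[i+1] for a vowel or 'q') by a single forward for-loop threading a pending-consonant accumulator that is flushed or fused with the next vowel.
import Mathlib
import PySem

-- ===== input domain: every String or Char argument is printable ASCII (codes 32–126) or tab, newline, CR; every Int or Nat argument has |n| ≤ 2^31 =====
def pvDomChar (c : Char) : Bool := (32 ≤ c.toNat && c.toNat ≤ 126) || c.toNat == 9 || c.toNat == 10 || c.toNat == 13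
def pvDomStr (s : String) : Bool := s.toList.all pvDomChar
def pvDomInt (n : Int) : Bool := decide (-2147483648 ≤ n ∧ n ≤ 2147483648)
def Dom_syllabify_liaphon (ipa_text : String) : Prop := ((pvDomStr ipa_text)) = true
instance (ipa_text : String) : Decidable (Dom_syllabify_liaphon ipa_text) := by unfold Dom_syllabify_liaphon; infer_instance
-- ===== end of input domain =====

-- B replaces A's index-based while loop (with i+=2 lookahead) by a single forward pass
-- threading a pending-consonant accumulator; objective: simpler.

-- ===== PORT A =====
def pvConsonantsA : PySem.Set String :=
  PySem.Set.ofList ["b", "d", "f", "g", "h", "j", "k", "l", "m", "n", "n~", "p", "r", "s", "s^", "t", "v", "w", "z", "z^", "ng", "gn"]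
def pvVowelsA : PySem.Set String :=
  PySem.Set.ofList ["a", "a~", "e", "e^", "e~", "i", "o", "o^", "o~", "u", "y", "x", "x^", "x~"]

-- A's while loop: advancing i by 1 or 2 over the phoneme list = structural recursion dropping 1 or 2 tokens
def pvLoopA : List String → List String
  | [] => []
  | phone :: rest =>
    if PySem.Set.contains pvVowelsA phone then
      phone :: pvLoopA rest
    else if PySem.Set.contains pvConsonantsA phone then
      match rest with
      | [] => [phone]
      | next :: rest' =>
        if PySem.Set.contains pvVowelsA next then
          (phone ++ next) :: pvLoopA rest'
        else if next == "q" then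
          phone :: pvLoopA rest'
        else
          phone :: pvLoopA (next :: rest')
    else pvLoopA rest
termination_by l => l.length
decreasing_by all_goals (simp [List.length_cons]; try omega)

def syllabify_liaphon (ipa_text : String) : List String :=
  pvLoopA (PySem.Str.split₀ ipa_text)

-- ===== PORT B =====
def pvConsonantsB : PySem.Set String :=
  PySem.Set.ofList ["b", "d", "f", "g", "h", "j", "k", "l", "m", "n", "n~", "p", "r", "s", "s^", "t", "v", "w", "z", "z^", "ng", "gn"]
def pvVowelsB : PySem.Set String :=
  PySem.Set.ofList ["a", "a~", "e", "e^", "e~", "i", "o", "o^", "o~", "u", "y", "x", "x^", "x~"]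

-- one step of B's for-loop over state (syllables, pending)
def pvStepB (st : List String × Option String) (tok : String) : List String × Option String :=
  if PySem.Set.contains pvVowelsB tok then
    (st.1 ++ [match st.2 with | none => tok | some p => p ++ tok], none)
  else if PySem.Set.contains pvConsonantsB tok then
    ((match st.2 with | none => st.1 | some p => st.1 ++ [p]), some tok)
  else
    ((match st.2 with | none => st.1 | some p => st.1 ++ [p]), none)

-- the final 'if pending is not None: syllables.append(pending)'
def pvFlushB (st : List String × Option String) : List String :=
  match st.2 with | none => st.1 | some p => st.1 ++ [p]

def syllabify_liaphon_alt (ipa_text : String) : List String :=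
  pvFlushB ((PySem.Str.split₀ ipa_text).foldl pvStepB ([], none))

-- ===== PRECONDITION & SPEC =====
def Spec_syllabify_liaphon (ipa_text : String) (out : List String) : Prop := out = syllabify_liaphon_alt ipa_text
instance (ipa_text : String) (out : List String) : Decidable (Spec_syllabify_liaphon ipa_text out) := by unfold Spec_syllabify_liaphon; infer_instance

-- ===== CLAIM (what is proved, stated in full; the proofs are below) =====
def Claim_equal_syllabify_liaphon : Prop := ∀ (ipa_text : String), Dom_syllabify_liaphon ipa_text → Spec_syllabify_liaphon ipa_text (syllabify_liaphon ipa_text)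

-- ===== LEMMAS AND PROOFS =====

lemma pv_cons_not_vowel (c : String) (h : PySem.Set.contains pvConsonantsA c = true) :
    PySem.Set.contains pvVowelsA c = false := by
  have hm : c ∈ (["b", "d", "f", "g", "h", "j", "k", "l", "m", "n", "n~", "p", "r", "s", "s^", "t", "v", "w", "z", "z^", "ng", "gn"] : List String) := by
    simpa [pvConsonantsA, PySem.Set.contains_iff] using h
  fin_cases hm <;> decide

lemma pv_cons_ne_q (c : String) (h : PySem.Set.contains pvConsonantsA c = true) : c ≠ "q" := by
  have hm : c ∈ (["b", "d", "f", "g", "h", "j", "k", "l", "m", "n", "n~", "p", "r", "s", "s^", "t", "v", "w", "z", "z^", "ng", "gn"] : List String) := by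
    simpa [pvConsonantsA, PySem.Set.contains_iff] using h
  fin_cases hm <;> decide

-- B's sets are (definitionally) A's sets
lemma pvVowelsB_eq : pvVowelsB = pvVowelsA := rfl
lemma pvConsonantsB_eq : pvConsonantsB = pvConsonantsA := rfl

-- branch equations for B's step
lemma pvStepB_vowel (out : List String) (p : Option String) (t : String)
    (hv : PySem.Set.contains pvVowelsA t = true) :
    pvStepB (out, p) t = (out ++ [match p with | none => t | some q => q ++ t], none) := by
  unfold pvStepB; rw [pvVowelsB_eq]; rw [if_pos hv]

lemma pvStepB_cons (out : List String) (p : Option String) (t : String)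
    (hv : ¬ PySem.Set.contains pvVowelsA t = true)
    (hc : PySem.Set.contains pvConsonantsA t = true) :
    pvStepB (out, p) t = ((match p with | none => out | some q => out ++ [q]), some t) := by
  unfold pvStepB; rw [pvVowelsB_eq, pvConsonantsB_eq]; rw [if_neg hv, if_pos hc]

lemma pvStepB_other (out : List String) (p : Option String) (t : String)
    (hv : ¬ PySem.Set.contains pvVowelsA t = true)
    (hc : ¬ PySem.Set.contains pvConsonantsA t = true) :
    pvStepB (out, p) t = ((match p with | none => out | some q => out ++ [q]), none) := by
  unfold pvStepB; rw [pvVowelsB_eq, pvConsonantsB_eq]; rw [if_neg hv, if_neg hc]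

-- branch equations for A's loop
lemma pvLoopA_vowel (t : String) (ts : List String)
    (hv : PySem.Set.contains pvVowelsA t = true) :
    pvLoopA (t :: ts) = t :: pvLoopA ts := by
  rw [pvLoopA.eq_def]; dsimp only; rw [if_pos hv]

lemma pvLoopA_skip (t : String) (ts : List String)
    (hv : ¬ PySem.Set.contains pvVowelsA t = true)
    (hc : ¬ PySem.Set.contains pvConsonantsA t = true) :
    pvLoopA (t :: ts) = pvLoopA ts := by
  rw [pvLoopA.eq_def]; dsimp only; rw [if_neg hv, if_neg hc]

lemma pvLoopA_cons_nil (c : String) (hc : PySem.Set.contains pvConsonantsA c = true) :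
    pvLoopA [c] = [c] := by
  rw [pvLoopA.eq_def]; dsimp only
  rw [if_neg (by rw [Bool.not_eq_true]; exact pv_cons_not_vowel c hc), if_pos hc]

lemma pvLoopA_cons_vowel (c t : String) (ts : List String)
    (hc : PySem.Set.contains pvConsonantsA c = true)
    (hv : PySem.Set.contains pvVowelsA t = true) :
    pvLoopA (c :: t :: ts) = (c ++ t) :: pvLoopA ts := by
  rw [pvLoopA.eq_def]; dsimp only
  rw [if_neg (by rw [Bool.not_eq_true]; exact pv_cons_not_vowel c hc), if_pos hc, if_pos hv]

lemma pvLoopA_cons_q (c : String) (ts : List String)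
    (hc : PySem.Set.contains pvConsonantsA c = true) :
    pvLoopA (c :: "q" :: ts) = c :: pvLoopA ts := by
  rw [pvLoopA.eq_def]; dsimp only
  rw [if_neg (by rw [Bool.not_eq_true]; exact pv_cons_not_vowel c hc), if_pos hc,
    if_neg (by decide), if_pos (by decide)]

lemma pvLoopA_cons_other (c t : String) (ts : List String)
    (hc : PySem.Set.contains pvConsonantsA c = true)
    (hv : ¬ PySem.Set.contains pvVowelsA t = true)
    (hq : t ≠ "q") :
    pvLoopA (c :: t :: ts) = c :: pvLoopA (t :: ts) := by
  rw [pvLoopA.eq_def]; dsimp only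
  rw [if_neg (by rw [Bool.not_eq_true]; exact pv_cons_not_vowel c hc), if_pos hc,
    if_neg hv, if_neg (by simp [hq])]

-- invariant of B's loop: with no pending it computes A's result; with a pending consonant c
-- it computes A's result on c prepended to the remaining tokens
lemma pv_main (l : List String) : ∀ out : List String,
    (pvFlushB (l.foldl pvStepB (out, none)) = out ++ pvLoopA l) ∧
    (∀ c : String, PySem.Set.contains pvConsonantsA c = true →
      pvFlushB (l.foldl pvStepB (out, some c)) = out ++ pvLoopA (c :: l)) := by
  induction l with
  | nil =>
    intro out
    refine ⟨by simp [pvFlushB, pvLoopA], ?_⟩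
    intro c hc
    rw [pvLoopA_cons_nil c hc]
    dsimp only [List.foldl_nil, pvFlushB]
  | cons t ts ih =>
    intro out
    constructor
    · -- no pending consonant
      rw [List.foldl_cons]
      by_cases hv : PySem.Set.contains pvVowelsA t = true
      · rw [pvStepB_vowel out none t hv]
        dsimp only
        rw [(ih _).1, pvLoopA_vowel t ts hv]
        simp
      · by_cases hcn : PySem.Set.contains pvConsonantsA t = true
        · rw [pvStepB_cons out none t hv hcn]
          dsimp only
          exact (ih _).2 t hcn
        · rw [pvStepB_other out none t hv hcn]
          dsimp only
          rw [(ih _).1, pvLoopA_skip t ts hv hcn]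
    · -- pending consonant c
      intro c hc
      rw [List.foldl_cons]
      by_cases hv : PySem.Set.contains pvVowelsA t = true
      · rw [pvStepB_vowel out (some c) t hv]
        dsimp only
        rw [(ih _).1, pvLoopA_cons_vowel c t ts hc hv]
        simp
      · by_cases hcn : PySem.Set.contains pvConsonantsA t = true
        · rw [pvStepB_cons out (some c) t hv hcn]
          dsimp only
          rw [(ih _).2 t hcn, pvLoopA_cons_other c t ts hc hv (pv_cons_ne_q t hcn)]
          simp
        · rw [pvStepB_other out (some c) t hv hcn]
          dsimp only
          rw [(ih _).1]
          by_cases hq : t = "q"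
          · subst hq
            rw [pvLoopA_cons_q c ts hc]
            simp
          · rw [pvLoopA_cons_other c t ts hc hv hq, pvLoopA_skip t ts hv hcn]
            simp

-- ===== VERDICT (by name: the statement is the Claim_ definition above) =====
theorem syllabify_liaphon_spec : Claim_equal_syllabify_liaphon := by
  intro s _
  unfold Spec_syllabify_liaphon syllabify_liaphon syllabify_liaphon_alt
  exact ((pv_main (PySem.Str.split₀ s) []).1.trans (by simp)).symm
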